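-- pv_equiv track=rewrite | github.com/ZoltanMG/fotografia-zoltan-mg | src/kommit.py | diagonal_inferior_izquierda
-- ===== SOURCE A (Python) =====
-- def diagonal_inferior_izquierda(dimenciones, x, y):
--     total = 0
--     new_dimencion_x = x
--     new_dimencion_y = (dimenciones - y) + 1
--     new_x = 1
--     new_y = 1
--
--     for fila in range(1, new_dimencion_y):
--         cont = 1
--         for columna in range(1, new_dimencion_x):
--             if cont == fila:
--                 total +=1
--             cont += 1
--     return total
-- ===== SOURCE B (Python) =====
-- def diagonal_inferior_izquierda(dimenciones, x, y):
--     # Closed form: each row fila in 1..dimenciones-y contributes 1 iff fila <= x-1.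
--     return max(0, min(dimenciones - y, x - 1))
-- ===== Notes on version B (the rewrite author's own statement) =====
-- stated objective: alternative
-- what changed: Replaced the nested counting loops by the closed form max(0, min(dimenciones - y, x - 1)).
import Mathlib
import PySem

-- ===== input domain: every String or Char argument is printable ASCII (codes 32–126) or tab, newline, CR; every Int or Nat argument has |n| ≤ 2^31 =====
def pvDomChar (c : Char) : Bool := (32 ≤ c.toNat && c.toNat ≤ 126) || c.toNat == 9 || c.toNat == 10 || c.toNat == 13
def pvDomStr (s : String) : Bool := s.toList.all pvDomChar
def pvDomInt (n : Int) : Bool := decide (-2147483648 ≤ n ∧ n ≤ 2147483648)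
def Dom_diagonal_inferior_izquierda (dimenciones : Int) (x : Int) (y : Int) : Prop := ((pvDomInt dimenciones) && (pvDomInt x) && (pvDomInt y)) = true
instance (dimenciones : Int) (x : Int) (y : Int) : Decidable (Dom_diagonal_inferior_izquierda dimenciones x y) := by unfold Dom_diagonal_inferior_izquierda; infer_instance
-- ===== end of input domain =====

-- ===== PORT A =====
-- B replaces A's nested counting loops by the closed form max(0, min(dimenciones-y, x-1)); objective: alternative.
def diagonal_inferior_izquierda (dimenciones : Int) (x : Int) (y : Int) : Int :=
  let new_dimencion_x := x
  let new_dimencion_y := (dimenciones - y) + 1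
  ((PySem.List.pyRange 1 new_dimencion_y 1).foldl (fun total fila =>
    ((PySem.List.pyRange 1 new_dimencion_x 1).foldl
      (fun (s : Int × Int) _columna =>
        (if s.2 = fila then s.1 + 1 else s.1, s.2 + 1)) (total, 1)).1) 0)

-- ===== PORT B =====
def diagonal_inferior_izquierda_alt (dimenciones : Int) (x : Int) (y : Int) : Int :=
  max 0 (min (dimenciones - y) (x - 1))

-- ===== PRECONDITION & SPEC =====
def Spec_diagonal_inferior_izquierda (dimenciones : Int) (x : Int) (y : Int) (out : Int) : Prop := out = diagonal_inferior_izquierda_alt dimenciones x y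
instance (dimenciones : Int) (x : Int) (y : Int) (out : Int) : Decidable (Spec_diagonal_inferior_izquierda dimenciones x y out) := by unfold Spec_diagonal_inferior_izquierda; infer_instance

-- ===== CLAIM (what is proved, stated in full; the proofs are below) =====
def Claim_equal_diagonal_inferior_izquierda : Prop := ∀ (dimenciones : Int) (x : Int) (y : Int), Dom_diagonal_inferior_izquierda dimenciones x y → Spec_diagonal_inferior_izquierda dimenciones x y (diagonal_inferior_izquierda dimenciones x y)

-- ===== LEMMAS AND PROOFS =====

-- The inner loop ignores the column value; its effect depends only on the list length.
theorem pv_inner (fila : Int) : ∀ (l : List Int) (t c : Int),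
    (l.foldl (fun (s : Int × Int) _columna =>
      (if s.2 = fila then s.1 + 1 else s.1, s.2 + 1)) (t, c)).1
    = t + if c ≤ fila ∧ fila < c + (l.length : Int) then 1 else 0
  | [], t, c => by simp
  | _ :: tl, t, c => by
    simp only [List.foldl_cons, pv_inner fila tl, List.length_cons]
    by_cases h : c = fila <;> simp [h] <;> split_ifs <;> push_cast <;> omega

-- The outer loop over pyRange 1 (1+n) 1 accumulates the closed form.
theorem pv_outer (x : Int) : ∀ (n : ℕ),
    ((PySem.List.pyRange 1 (1 + (n : Int)) 1).foldl
      (fun total fila => total + if 1 ≤ fila ∧ fila < 1 + ((x - 1).toNat : Int) then 1 else 0) 0)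
    = max 0 (min (n : Int) (x - 1))
  | 0 => by
    rw [PySem.List.pyRange_one_eq_nil (by omega)]
    simp
  | n + 1 => by
    have h : (1 : Int) + ((n + 1 : ℕ) : Int) = (1 + (n : Int)) + 1 := by push_cast; omega
    rw [h, PySem.List.pyRange_one_succ_right (by omega), List.foldl_append, pv_outer x n]
    simp only [List.foldl_cons, List.foldl_nil]
    split_ifs <;> push_cast at * <;> omega

theorem pv_main (dimenciones x y : Int) :
    Spec_diagonal_inferior_izquierda dimenciones x y
      (diagonal_inferior_izquierda dimenciones x y) := by
  unfold Spec_diagonal_inferior_izquierda diagonal_inferior_izquierda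
    diagonal_inferior_izquierda_alt
  simp only [pv_inner, PySem.List.length_pyRange_one]
  by_cases h : dimenciones - y + 1 ≤ 1
  · rw [PySem.List.pyRange_one_eq_nil h]
    simp; omega
  · have hn : dimenciones - y + 1 = 1 + (((dimenciones - y).toNat : ℕ) : Int) := by omega
    rw [hn, pv_outer x]
    omega


-- ===== VERDICT (by name: the statement is the Claim_ definition above) =====
theorem diagonal_inferior_izquierda_spec : Claim_equal_diagonal_inferior_izquierda :=
  fun d x y _ => pv_main d x y
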